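-- pv_equiv track=rewrite | github.com/patedit/adventofcode | 2023/12.py | valid_record
-- ===== SOURCE A (Python) =====
-- def valid_record(record, group):
--     group_i = 0
--     record_i = 0
--     while record_i < len(record) and group_i < len(group):
--         if record[record_i] == '.':
--             record_i += 1
--         elif record[record_i] == '#':
--             start_i = record_i
--             while record_i < len(record) and record[record_i] == '#':
--                 record_i += 1
--             if record_i - start_i != group[group_i]:
--                 return False
--             group_i += 1
--         else:
--             return False
--     return group_i == len(group) and (record_i == len(record) or '#' not in record[record_i:])
-- ===== SOURCE B (Python) =====
-- def valid_record(record, group):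
--     # Single-pass finite-state automaton over the characters:
--     # GAP = between runs, RUN = inside a required '#'-run (k = '#'s still owed),
--     # TAIL = all groups satisfied, FAIL = mismatch seen.
--     GAP, RUN, TAIL, FAIL = 0, 1, 2, 3
--     mode = GAP if group else TAIL
--     gi = 0
--     k = 0
--     for c in record:
--         if mode == TAIL:
--             if c == '#':
--                 mode = FAIL
--         elif mode == GAP:
--             if c == '#':
--                 k = group[gi] - 1
--                 gi += 1
--                 mode = RUN
--             elif c != '.':
--                 mode = FAIL
--         elif mode == RUN:
--             if c == '#':
--                 k -= 1
--             elif k != 0: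
--                 mode = FAIL
--             elif gi == len(group):
--                 mode = TAIL
--             elif c == '.':
--                 mode = GAP
--             else:
--                 mode = FAIL
--         # FAIL absorbs
--     return mode == TAIL or (mode == RUN and k == 0 and gi == len(group))
-- ===== Notes on version B (the rewrite author's own statement) =====
-- stated objective: alternative
-- what changed: B replaces A's nested while loops (index cursor that measures each '#'-run and compares its length to the group) by a single for-each-character pass of an explicit finite-state automaton with modes GAP/RUN/TAIL/FAIL and a decrementing owed-'#' counter; no run length is ever measured or compared.
import Mathlib
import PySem

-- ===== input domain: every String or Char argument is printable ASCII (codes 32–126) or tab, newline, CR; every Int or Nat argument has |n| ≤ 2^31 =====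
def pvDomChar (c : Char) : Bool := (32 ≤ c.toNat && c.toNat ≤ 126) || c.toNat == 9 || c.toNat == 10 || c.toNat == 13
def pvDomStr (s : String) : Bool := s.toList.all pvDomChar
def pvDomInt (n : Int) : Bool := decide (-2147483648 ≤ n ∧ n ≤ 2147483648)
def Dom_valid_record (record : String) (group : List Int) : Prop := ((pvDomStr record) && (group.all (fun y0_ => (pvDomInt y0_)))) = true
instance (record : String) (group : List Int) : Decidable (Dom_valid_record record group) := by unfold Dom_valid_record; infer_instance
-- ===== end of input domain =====

-- B re-implements the check as a single-pass finite-state automaton folded over the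
-- characters (modes GAP/RUN/TAIL/FAIL, a decrementing owed-'#' counter), instead of
-- A's index state machine that measures each '#'-run and compares its length.

-- ===== PORT A =====
-- A's inner while: advance record_i past consecutive '#' (record[record_i] read only when in range, so getD is exact)
def aRunEnd (cs : List Char) : Nat → Nat → Nat
  | 0, i => i
  | fuel + 1, i => if i < cs.length ∧ cs.getD i ' ' = '#' then aRunEnd cs fuel (i + 1) else i

-- A's outer while loop; on exit, Python's final `return` line
-- ('#' not in record[record_i:] is ported as contains on the dropped char list — exact for a one-char needle)
def aLoop (cs : List Char) (gs : List Int) : Nat → Nat → Nat → Bool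
  | 0, _, _ => false
  | fuel + 1, recordI, groupI =>
    if recordI < cs.length ∧ groupI < gs.length then
      if cs.getD recordI ' ' = '.' then aLoop cs gs fuel (recordI + 1) groupI
      else if cs.getD recordI ' ' = '#' then
        let e := aRunEnd cs cs.length recordI
        if (e : Int) - (recordI : Int) ≠ gs.getD groupI 0 then false
        else aLoop cs gs fuel e (groupI + 1)
      else false
    else
      decide (groupI = gs.length) &&
        (decide (recordI = cs.length) || !((cs.drop recordI).contains '#'))

def valid_record (record : String) (group : List Int) : Bool :=
  aLoop record.toList group (record.toList.length + 1) 0 0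

-- ===== PORT B =====
-- Source B's loop body: one automaton step per character; modes GAP=0, RUN=1, TAIL=2, FAIL=3
def bStep (gs : List Int) (st : Nat × Nat × Int) (c : Char) : Nat × Nat × Int :=
  match st with
  | (mode, gi, k) =>
    if mode = 2 then
      if c = '#' then (3, gi, k) else (mode, gi, k)
    else if mode = 0 then
      if c = '#' then (1, gi + 1, gs.getD gi 0 - 1)
      else if c ≠ '.' then (3, gi, k)
      else (mode, gi, k)
    else if mode = 1 then
      if c = '#' then (1, gi, k - 1)
      else if k ≠ 0 then (3, gi, k)
      else if gi = gs.length then (2, gi, k)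
      else if c = '.' then (0, gi, k)
      else (3, gi, k)
    else (mode, gi, k)

-- Source B's final `return mode == TAIL or (mode == RUN and k == 0 and gi == len(group))`
def bDone (gs : List Int) (st : Nat × Nat × Int) : Bool :=
  match st with
  | (mode, gi, k) => decide (mode = 2) || (decide (mode = 1) && decide (k = 0) && decide (gi = gs.length))

def valid_record_alt (record : String) (group : List Int) : Bool :=
  bDone group (record.toList.foldl (bStep group)
    ((if group.isEmpty then 2 else 0 : Nat), (0 : Nat), (0 : Int)))

-- ===== PRECONDITION & SPEC =====
def Spec_valid_record (record : String) (group : List Int) (out : Bool) : Prop := out = valid_record_alt record group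
instance (record : String) (group : List Int) (out : Bool) : Decidable (Spec_valid_record record group out) := by unfold Spec_valid_record; infer_instance

-- ===== CLAIM (what is proved, stated in full; the proofs are below) =====
def Claim_equal_valid_record : Prop := ∀ (record : String) (group : List Int), Dom_valid_record record group → Spec_valid_record record group (valid_record record group)

-- ===== LEMMAS AND PROOFS =====

theorem fail_absorb (gs : List Int) (gi : Nat) (k : Int) :
    ∀ l : List Char, List.foldl (bStep gs) (3, gi, k) l = (3, gi, k) := by
  intro l
  induction l with
  | nil => rfl
  | cons c t ih => simpa [bStep] using ih

theorem tail_run (gs : List Int) :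
    ∀ (l : List Char) (gi : Nat) (k : Int),
      bDone gs (List.foldl (bStep gs) (2, gi, k) l) = !(l.contains '#') := by
  intro l
  induction l with
  | nil => intro gi k; simp [bDone]
  | cons c t ih =>
    intro gi k
    by_cases hc : c = '#'
    · simp [hc, bStep, fail_absorb, bDone]
    · rw [List.foldl_cons]
      have hstep : bStep gs (2, gi, k) c = (2, gi, k) := by simp [bStep, hc]
      rw [hstep, ih]
      simp [show ¬'#' = c from fun h => hc h.symm]

theorem run_replicate (gs : List Int) :
    ∀ (m : Nat) (l : List Char) (gi : Nat) (k : Int),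
      List.foldl (bStep gs) (1, gi, k) (List.replicate m '#' ++ l) =
      List.foldl (bStep gs) (1, gi, k - m) l := by
  intro m
  induction m with
  | zero => intro l gi k; simp
  | succ n ih =>
    intro l gi k
    rw [List.replicate_succ, List.cons_append, List.foldl_cons]
    have hstep : bStep gs (1, gi, k) '#' = (1, gi, k - 1) := by simp [bStep]
    rw [hstep, ih]
    have harith : k - 1 - (n : Int) = k - ((n + 1 : Nat) : Int) := by push_cast; ring
    rw [harith]

theorem aRunEnd_ge (cs : List Char) (fuel : Nat) : ∀ i, i ≤ aRunEnd cs fuel i := by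
  induction fuel with
  | zero => intro i; rw [aRunEnd]
  | succ f ih =>
    intro i
    rw [aRunEnd]
    split
    · exact Nat.le_trans (Nat.le_succ i) (ih (i + 1))
    · exact Nat.le_refl i

theorem aRunEnd_le (cs : List Char) (fuel : Nat) : ∀ i, i ≤ cs.length → aRunEnd cs fuel i ≤ cs.length := by
  induction fuel with
  | zero => intro i h; rw [aRunEnd]; exact h
  | succ f ih =>
    intro i h
    rw [aRunEnd]
    split
    · next hc => exact ih (i + 1) hc.1
    · exact h

theorem aRunEnd_gt (cs : List Char) (fuel i : Nat) (h1 : i < cs.length)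
    (h2 : cs.getD i ' ' = '#') (hf : 0 < fuel) : i < aRunEnd cs fuel i := by
  cases fuel with
  | zero => omega
  | succ f =>
    rw [aRunEnd, if_pos ⟨h1, h2⟩]
    exact Nat.lt_of_lt_of_le (Nat.lt_succ_self i) (aRunEnd_ge cs f (i + 1))

theorem aRunEnd_hash (cs : List Char) (fuel : Nat) :
    ∀ i j, i ≤ j → j < aRunEnd cs fuel i → cs.getD j ' ' = '#' := by
  induction fuel with
  | zero => intro i j h1 h2; rw [aRunEnd] at h2; omega
  | succ f ih =>
    intro i j h1 h2
    rw [aRunEnd] at h2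
    split at h2
    · next hc =>
      by_cases hij : j = i
      · rw [hij]; exact hc.2
      · exact ih (i + 1) j (by omega) h2
    · omega

theorem aRunEnd_stop (cs : List Char) (fuel : Nat) :
    ∀ i, cs.length - i ≤ fuel →
      ¬(aRunEnd cs fuel i < cs.length ∧ cs.getD (aRunEnd cs fuel i) ' ' = '#') := by
  induction fuel with
  | zero => intro i h; rw [aRunEnd]; omega
  | succ f ih =>
    intro i h
    rw [aRunEnd]
    split
    · next hc => exact ih (i + 1) (by omega)
    · next hc => exact hc
theorem drop_run (cs : List Char) :
    ∀ n i e, e - i = n → i ≤ e → e ≤ cs.length →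
      (∀ j, i ≤ j → j < e → cs.getD j ' ' = '#') →
      cs.drop i = List.replicate (e - i) '#' ++ cs.drop e := by
  intro n
  induction n with
  | zero =>
    intro i e h1 h2 h3 h4
    have hie : i = e := by omega
    subst hie
    simp
  | succ m ih =>
    intro i e h1 h2 h3 h4
    have hi : i < cs.length := by omega
    have hdrop : cs.drop i = cs[i] :: cs.drop (i + 1) := List.drop_eq_getElem_cons hi
    have hhead : cs[i] = '#' := by
      have := h4 i (le_refl i) (by omega)
      rwa [List.getD_eq_getElem?_getD, List.getElem?_eq_getElem hi, Option.getD_some] at this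
    have htail := ih (i + 1) e (by omega) (by omega) h3 (fun j hj1 hj2 => h4 j (by omega) hj2)
    rw [hdrop, hhead, htail]
    have : e - i = (e - (i + 1)) + 1 := by omega
    rw [this, List.replicate_succ, List.cons_append]

theorem main_inv (cs : List Char) (gs : List Int) :
    ∀ fuel ri gi k, gi ≤ gs.length → ri ≤ cs.length → cs.length - ri < fuel →
      aLoop cs gs fuel ri gi =
        bDone gs (List.foldl (bStep gs)
          ((if gi = gs.length then 2 else 0 : Nat), gi, k) (cs.drop ri)) := by
  intro fuel
  induction fuel with
  | zero => intro ri gi k _ _ h; omega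
  | succ f ih =>
    intro ri gi k hgi hri hfuel
    rw [aLoop]
    by_cases h : ri < cs.length ∧ gi < gs.length
    · rw [if_pos h]
      have hgine : ¬ gi = gs.length := by omega
      rw [if_neg hgine]
      have hdrop : cs.drop ri = cs[ri] :: cs.drop (ri + 1) := List.drop_eq_getElem_cons h.1
      have hgetD : cs.getD ri ' ' = cs[ri] := by
        rw [List.getD_eq_getElem?_getD, List.getElem?_eq_getElem h.1, Option.getD_some]
      by_cases hdot : cs.getD ri ' ' = '.'
      · -- '.' step
        rw [if_pos hdot]
        rw [ih (ri + 1) gi k hgi (by omega) (by omega), if_neg hgine]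
        rw [hdrop, List.foldl_cons]
        have : bStep gs (0, gi, k) cs[ri] = (0, gi, k) := by
          rw [← hgetD, hdot]; simp [bStep]
        rw [this]
      · rw [if_neg hdot]
        by_cases hhash : cs.getD ri ' ' = '#'
        · -- '#' step: the whole run
          rw [if_pos hhash]
          have he1 : ri < aRunEnd cs cs.length ri := aRunEnd_gt cs cs.length ri h.1 hhash (by omega)
          have he2 : aRunEnd cs cs.length ri ≤ cs.length := aRunEnd_le cs cs.length ri hri
          have hstop : ¬(aRunEnd cs cs.length ri < cs.length ∧
              cs.getD (aRunEnd cs cs.length ri) ' ' = '#') :=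
            aRunEnd_stop cs cs.length ri (by omega)
          have hrun : cs.drop ri =
              List.replicate (aRunEnd cs cs.length ri - ri) '#' ++ cs.drop (aRunEnd cs cs.length ri) :=
            drop_run cs _ ri _ rfl (by omega) he2 (aRunEnd_hash cs cs.length ri)
          generalize he : aRunEnd cs cs.length ri = e at he1 he2 hstop hrun ⊢
          obtain ⟨m, hm⟩ : ∃ m, e - ri = m + 1 := ⟨e - ri - 1, by omega⟩
          have hfold : List.foldl (bStep gs) (0, gi, k) (cs.drop ri) =
              List.foldl (bStep gs) (1, gi + 1, gs.getD gi 0 - ((e - ri : Nat) : Int)) (cs.drop e) := by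
            rw [hrun, hm, List.replicate_succ, List.cons_append, List.foldl_cons]
            have hstep1 : bStep gs (0, gi, k) '#' = (1, gi + 1, gs.getD gi 0 - 1) := by
              simp [bStep]
            rw [hstep1, run_replicate]
            have harith : gs.getD gi 0 - 1 - (m : Int) = gs.getD gi 0 - ((m + 1 : Nat) : Int) := by
              push_cast; ring
            rw [harith]
          by_cases hne : ((e : Int) - (ri : Int)) ≠ gs.getD gi 0
          · -- mismatch: A returns False; B's automaton is owed k ≠ 0 '#'s at the run end
            rw [if_pos hne, hfold]
            have hkne : gs.getD gi 0 - ((e - ri : Nat) : Int) ≠ 0 := by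
              intro hcon; exact hne (by omega)
            have hkne' : gs[gi]?.getD 0 - ((e - ri : Nat) : Int) ≠ 0 := by
              rwa [List.getD_eq_getElem?_getD] at hkne
            rcases Nat.lt_or_ge e cs.length with hel | hel
            · have hdrope : cs.drop e = cs[e] :: cs.drop (e + 1) := List.drop_eq_getElem_cons hel
              have hce : cs[e] ≠ '#' := by
                intro hc
                exact hstop ⟨hel, by
                  rw [List.getD_eq_getElem?_getD, List.getElem?_eq_getElem hel, Option.getD_some, hc]⟩
              rw [hdrope, List.foldl_cons]
              have hstep2 : bStep gs (1, gi + 1, gs.getD gi 0 - ((e - ri : Nat) : Int)) cs[e]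
                  = (3, gi + 1, gs.getD gi 0 - ((e - ri : Nat) : Int)) := by
                simp [bStep, hce, hkne']
              rw [hstep2, fail_absorb]
              simp [bDone]
            · have hnil : cs.drop e = [] := List.drop_eq_nil_of_le (by omega)
              rw [hnil]
              simp [bDone, hkne']
          · -- match: the automaton is owed 0 '#'s; A recurses from e with gi+1
            rw [if_neg hne, hfold]
            rw [not_ne_iff] at hne
            have hk0 : gs.getD gi 0 - ((e - ri : Nat) : Int) = 0 := by omega
            rw [hk0]
            rw [ih e (gi + 1) 0 (by omega) he2 (by omega)]
            rcases Nat.lt_or_ge e cs.length with hel | hel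
            · have hdrope : cs.drop e = cs[e] :: cs.drop (e + 1) := List.drop_eq_getElem_cons hel
              have hce : cs[e] ≠ '#' := by
                intro hc
                exact hstop ⟨hel, by
                  rw [List.getD_eq_getElem?_getD, List.getElem?_eq_getElem hel, Option.getD_some, hc]⟩
              rw [hdrope, List.foldl_cons, List.foldl_cons]
              by_cases hgl : gi + 1 = gs.length
              · have h1 : bStep gs (1, gi + 1, 0) cs[e] = (2, gi + 1, 0) := by
                  simp [bStep, hce, hgl]
                have h2 : bStep gs ((if gi + 1 = gs.length then 2 else 0 : Nat), gi + 1, 0) cs[e]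
                    = (2, gi + 1, 0) := by
                  simp [hgl, bStep, hce]
                rw [h1, h2]
              · rw [if_neg hgl]
                by_cases hce2 : cs[e] = '.'
                · have h1 : bStep gs (1, gi + 1, 0) cs[e] = (0, gi + 1, 0) := by
                    simp [bStep, hce2, hgl]
                  have h2 : bStep gs (0, gi + 1, 0) cs[e] = (0, gi + 1, 0) := by
                    simp [bStep, hce2]
                  rw [h1, h2]
                · have h1 : bStep gs (1, gi + 1, 0) cs[e] = (3, gi + 1, 0) := by
                    simp [bStep, hce, hce2, hgl]
                  have h2 : bStep gs (0, gi + 1, 0) cs[e] = (3, gi + 1, 0) := by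
                    simp [bStep, hce, hce2]
                  rw [h1, h2]
            · have hnil : cs.drop e = [] := List.drop_eq_nil_of_le (by omega)
              rw [hnil]
              by_cases hgl : gi + 1 = gs.length
              · simp [hgl, bDone]
              · simp [hgl, bDone]
        · -- invalid character while groups remain
          rw [if_neg hhash]
          rw [hdrop, List.foldl_cons]
          have hc1 : cs[ri] ≠ '#' := fun hcon => hhash (by rw [hgetD, hcon])
          have hc2 : cs[ri] ≠ '.' := fun hcon => hdot (by rw [hgetD, hcon])
          have hstep : bStep gs (0, gi, k) cs[ri] = (3, gi, k) := by
            simp [bStep, hc1, hc2]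
          rw [hstep, fail_absorb]
          simp [bDone]
    · -- loop exit
      rw [if_neg h]
      by_cases hgl : gi = gs.length
      · rw [if_pos hgl]
        rw [tail_run]
        by_cases hre : ri = cs.length
        · simp [hgl, hre, List.drop_length]
        · simp [hgl, hre]
      · rw [if_neg hgl]
        have hre : ¬ ri < cs.length := fun c => h ⟨c, by omega⟩
        have hnil : cs.drop ri = [] := List.drop_eq_nil_of_le (by omega)
        rw [hnil]
        simp [bDone, hgl]

-- ===== VERDICT (by name: the statement is the Claim_ definition above) =====
theorem valid_record_spec : Claim_equal_valid_record := by
  intro record group _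
  unfold Spec_valid_record valid_record valid_record_alt
  have h := main_inv record.toList group (record.toList.length + 1) 0 0 0
    (Nat.zero_le _) (Nat.zero_le _) (by omega)
  simp only [List.drop_zero] at h
  rw [h]
  cases group <;> simp
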